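-- pv_equiv track=rewrite | github.com/kevjn/advent-of-code | 2023/day15.py | hhash
-- ===== SOURCE A (Python) =====
-- def hhash(label):
--     res = 0
--     for char in label:
--         n = ord(char)
--         res += n
--         res *= 17
--         res %= 256
--     return res
-- ===== SOURCE B (Python) =====
-- def hhash(label):
--     n = len(label)
--     return sum(ord(c) * pow(17, n - i, 256) for i, c in enumerate(label)) % 256
-- ===== Notes on version B (the rewrite author's own statement) =====
-- stated objective: alternative
-- what changed: Replaces the running Horner accumulator (add, *17, mod each step) by a closed-form weighted polynomial sum: each character's code is multiplied by its explicit power-of-17 weight 17^(n-i) mod 256 and the weighted terms are summed with a single final mod 256.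
import Mathlib
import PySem

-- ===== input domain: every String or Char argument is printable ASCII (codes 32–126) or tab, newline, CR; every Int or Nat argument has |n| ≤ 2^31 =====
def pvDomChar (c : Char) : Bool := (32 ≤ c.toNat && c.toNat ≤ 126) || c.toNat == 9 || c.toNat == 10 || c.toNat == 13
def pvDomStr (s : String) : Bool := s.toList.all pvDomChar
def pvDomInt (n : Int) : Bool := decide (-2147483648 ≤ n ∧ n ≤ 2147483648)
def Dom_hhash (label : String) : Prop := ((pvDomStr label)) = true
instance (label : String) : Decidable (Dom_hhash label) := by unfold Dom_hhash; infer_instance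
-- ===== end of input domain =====

-- B replaces A's running Horner accumulator by an explicit weighted polynomial sum
-- (each code times its power-of-17 weight mod 256, summed, one final mod); objective: alternative.

-- ===== PORT A =====
def hhash (label : String) : Int :=
  label.toList.foldl (fun res c => PySem.Int.mod ((res + (c.toNat : Int)) * 17) 256) 0

-- ===== PORT B =====
-- term for one (index, char) pair of enumerate: ord(c) * pow(17, n - i, 256)
-- (the exponent n - i is never negative, so .toNat is exact here)
def hhashTerm (n : Int) (p : Int × Char) : Int :=
  (p.2.toNat : Int) * PySem.Int.powMod 17 (n - p.1).toNat 256

def hhash_alt (label : String) : Int :=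
  let n : Int := PySem.Str.len label
  PySem.Int.mod (((PySem.List.enumerate label.toList 0).map (hhashTerm n)).sum) 256

-- ===== PRECONDITION & SPEC =====
def Spec_hhash (label : String) (out : Int) : Prop := out = hhash_alt label
instance (label : String) (out : Int) : Decidable (Spec_hhash label out) := by unfold Spec_hhash; infer_instance

-- ===== CLAIM (what is proved, stated in full; the proofs are below) =====
def Claim_equal_hhash : Prop := ∀ (label : String), Dom_hhash label → Spec_hhash label (hhash label)

-- ===== LEMMAS AND PROOFS =====

-- Loop invariant: folding A's step from a reduced accumulator r over t computes
-- (r * 17^|t| + weighted sum of t's terms) mod 256.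
theorem hhash_loop (t : List Char) : ∀ (r s n : Int), 0 ≤ r → r < 256 → n - s = (t.length : Int) →
    t.foldl (fun res c => PySem.Int.mod ((res + (c.toNat : Int)) * 17) 256) r
      = PySem.Int.mod (r * 17 ^ t.length + ((PySem.List.enumerate t s).map (hhashTerm n)).sum) 256 := by
  induction t with
  | nil =>
    intro r s n h0 h1 h2
    simp only [List.foldl_nil, PySem.List.enumerate_nil, List.map_nil, List.sum_nil,
      List.length_nil, pow_zero, mul_one, add_zero,
      PySem.Int.mod_eq_emod_of_pos (by norm_num : (0:Int) < 256)]
    omega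
  | cons c t ih =>
    intro r s n h0 h1 h2
    have hstep : (0:Int) < 256 := by norm_num
    simp only [List.foldl_cons, List.length_cons]
    rw [ih (PySem.Int.mod ((r + (c.toNat : Int)) * 17) 256) (s+1) n
        (PySem.Int.mod_nonneg _ hstep) (PySem.Int.mod_lt _ hstep)
        (by simp at h2 ⊢; omega)]
    rw [PySem.List.enumerate_cons]
    simp only [List.map_cons, List.sum_cons, hhashTerm, PySem.Int.powMod_eq]
    rw [show ((n - ((s : Int), c).1).toNat) = t.length + 1 from by simp at h2 ⊢; omega]
    simp only [PySem.Int.mod_eq_emod_of_pos hstep]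
    set S := ((PySem.List.enumerate t (s+1)).map (hhashTerm n)).sum with hS
    -- reduce to a congruence mod 256
    have m1 : Int.ModEq 256 ((r + (c.toNat : Int)) * 17 % 256 * 17 ^ t.length + S)
        ((r + (c.toNat : Int)) * 17 * 17 ^ t.length + S) :=
      Int.ModEq.add_right S (Int.ModEq.mul_right _ (Int.emod_emod_of_dvd _ dvd_rfl))
    have m2 : Int.ModEq 256 ((r + (c.toNat : Int)) * 17 * 17 ^ t.length + S)
        (r * 17 ^ (t.length + 1) + ((c.toNat : Int) * (17 ^ (t.length + 1) % 256) + S)) := by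
      have h3 : Int.ModEq 256 ((c.toNat : Int) * 17 ^ (t.length + 1))
          ((c.toNat : Int) * (17 ^ (t.length + 1) % 256)) :=
        Int.ModEq.mul_left _ (Int.emod_emod_of_dvd _ dvd_rfl).symm
      calc (r + (c.toNat : Int)) * 17 * 17 ^ t.length + S
          = r * 17 ^ (t.length + 1) + ((c.toNat : Int) * 17 ^ (t.length + 1) + S) := by ring
        _ ≡ r * 17 ^ (t.length + 1) + ((c.toNat : Int) * (17 ^ (t.length + 1) % 256) + S)
            [ZMOD 256] := Int.ModEq.add_left _ (Int.ModEq.add_right S h3)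
    exact m1.trans m2

-- ===== VERDICT (by name: the statement is the Claim_ definition above) =====
theorem hhash_spec : Claim_equal_hhash := by
  intro label _
  unfold Spec_hhash hhash hhash_alt
  rw [hhash_loop label.toList 0 0 (PySem.Str.len label) le_rfl (by norm_num)
      (by simp [PySem.Str.len_eq])]
  simp
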